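-- pv_equiv track=rewrite | github.com/manestay/novel-chapter-dataset | scraping/novelguide_scrape.py | no_colon_section
-- ===== SOURCE A (Python) =====
-- ANALYSIS = ('Analysis', 'Commentary', 'advertisement')
--
-- def no_colon_section(texts, title):
--     sect_summ = []
--     chapters = []
--     write = False
--     for text in texts:
--         if any(text.startswith(x) for x in ANALYSIS):
--             chapters.append((title, sect_summ))
--             break
--         elif text == 'Summary':
--             write = True
--             continue
--         if write:
--             sect_summ.append(text)
--     return chapters
-- ===== SOURCE B (Python) =====
-- ANALYSIS = ('Analysis', 'Commentary', 'advertisement')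
--
-- def no_colon_section(texts, title):
--     # find index of first ANALYSIS-marker line; none -> no chapter at all
--     idx = next((i for i, t in enumerate(texts) if t.startswith(ANALYSIS)), None)
--     if idx is None:
--         return []
--     pre = texts[:idx]
--     try:
--         s = pre.index('Summary')
--     except ValueError:
--         return [(title, [])]
--     return [(title, [t for t in pre[s + 1:] if t != 'Summary'])]
-- ===== Notes on version B (the rewrite author's own statement) =====
-- stated objective: alternative
-- what changed: Replaces the stateful write-flag loop by an index-based decomposition: locate the first ANALYSIS marker, locate the first 'Summary' before it, and build the section as one slice-and-filter.
import Mathlib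
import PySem

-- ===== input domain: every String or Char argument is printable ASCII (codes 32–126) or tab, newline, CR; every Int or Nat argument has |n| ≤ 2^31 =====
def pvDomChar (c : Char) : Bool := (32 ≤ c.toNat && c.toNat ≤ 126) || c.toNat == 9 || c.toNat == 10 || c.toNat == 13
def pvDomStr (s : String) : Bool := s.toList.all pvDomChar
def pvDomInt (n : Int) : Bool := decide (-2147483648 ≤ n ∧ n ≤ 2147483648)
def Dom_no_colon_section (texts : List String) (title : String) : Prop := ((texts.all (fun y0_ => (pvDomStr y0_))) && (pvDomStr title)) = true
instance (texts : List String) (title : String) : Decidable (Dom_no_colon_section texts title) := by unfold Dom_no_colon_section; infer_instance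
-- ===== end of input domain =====

-- B replaces A's stateful write-flag loop by locating the marker and the first 'Summary'
-- and building the section with one slice-and-filter (objective: alternative decomposition).

-- shared module constant
def ANALYSIS : List String := ["Analysis", "Commentary", "advertisement"]

-- text.startswith(ANALYSIS) / any(text.startswith(x) for x in ANALYSIS)
def pvIsMarker (t : String) : Bool := ANALYSIS.any (fun x => PySem.Str.startswith t x)

-- ===== PORT A =====
-- the for-loop of A with its state (sect_summ, write); returning [(title, sect)] = append+break
def noColonLoopA (texts : List String) (title : String) (sect : List String) (write : Bool) :
    List (String × List String) :=
  match texts with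
  | [] => []
  | t :: rest =>
    if pvIsMarker t then [(title, sect)]
    else if t == "Summary" then noColonLoopA rest title sect true
    else if write then noColonLoopA rest title (sect ++ [t]) write
    else noColonLoopA rest title sect write

def no_colon_section (texts : List String) (title : String) : List (String × List String) :=
  noColonLoopA texts title [] false

-- ===== PORT B =====
def no_colon_section_alt (texts : List String) (title : String) : List (String × List String) :=
  match texts.findIdx? pvIsMarker with
  | none => []
  | some i =>
    let pre := texts.take i
    match PySem.List.index? pre "Summary" with
    | none => [(title, [])]
    | some s => [(title, (pre.drop (s + 1)).filter (fun t => t != "Summary"))]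

-- ===== PRECONDITION & SPEC =====
def Spec_no_colon_section (texts : List String) (title : String) (out : List (String × List String)) : Prop := out = no_colon_section_alt texts title
instance (texts : List String) (title : String) (out : List (String × List String)) : Decidable (Spec_no_colon_section texts title out) := by unfold Spec_no_colon_section; infer_instance

-- ===== CLAIM (what is proved, stated in full; the proofs are below) =====
def Claim_equal_no_colon_section : Prop := ∀ (texts : List String) (title : String), Dom_no_colon_section texts title → Spec_no_colon_section texts title (no_colon_section texts title)

-- ===== LEMMAS AND PROOFS =====

-- once write = true, A collects every non-'Summary' line up to the marker
theorem loopA_true (texts : List String) (title : String) (sect : List String) :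
    noColonLoopA texts title sect true =
      match texts.findIdx? pvIsMarker with
      | none => []
      | some i => [(title, sect ++ (texts.take i).filter (fun t => t != "Summary"))] := by
  induction texts generalizing sect with
  | nil => simp [noColonLoopA]
  | cons t rest ih =>
    by_cases hm : pvIsMarker t = true
    · simp [noColonLoopA, hm, List.findIdx?_cons]
    · by_cases hs : t = "Summary"
      · subst hs
        simp only [noColonLoopA, hm, beq_self_eq_true, if_true, ih,
          List.findIdx?_cons, Option.map]
        cases rest.findIdx? pvIsMarker <;> simp
      · have hb : (t == "Summary") = false := by simp [hs]
        simp only [noColonLoopA, hm, hb, if_true, ih, List.findIdx?_cons, Option.map]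
        cases rest.findIdx? pvIsMarker <;> simp [hs]

-- with write = false, A drops lines until the first 'Summary' before the marker
theorem loopA_false (texts : List String) (title : String) (sect : List String) :
    noColonLoopA texts title sect false =
      match texts.findIdx? pvIsMarker with
      | none => []
      | some i =>
        match PySem.List.index? (texts.take i) "Summary" with
        | none => [(title, sect)]
        | some s => [(title, sect ++ ((texts.take i).drop (s + 1)).filter (fun t => t != "Summary"))] := by
  induction texts with
  | nil => simp [noColonLoopA]
  | cons t rest ih =>
    by_cases hm : pvIsMarker t = true
    · simp [noColonLoopA, hm, List.findIdx?_cons, PySem.List.index?]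
    · by_cases hs : t = "Summary"
      · subst hs
        simp only [noColonLoopA, hm, if_false, beq_self_eq_true, if_true,
          loopA_true, List.findIdx?_cons, Bool.false_eq_true]
        cases rest.findIdx? pvIsMarker with
        | none => rfl
        | some i =>
          rw [Option.map_some]; dsimp only
          rw [List.take_succ_cons, PySem.List.index?_cons_self]
          simp
      · have hb : (t == "Summary") = false := by simp [hs]
        simp only [noColonLoopA, hm, if_false, hb, ih, List.findIdx?_cons, Bool.false_eq_true]
        cases rest.findIdx? pvIsMarker with
        | none => rfl
        | some i =>
          rw [Option.map_some]; dsimp only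
          rw [List.take_succ_cons, PySem.List.index?_cons_of_ne (rest.take i) hs]
          cases PySem.List.index? (rest.take i) "Summary" with
          | none => rfl
          | some s => simp

-- ===== VERDICT (by name: the statement is the Claim_ definition above) =====
theorem no_colon_section_spec : Claim_equal_no_colon_section := by
  intro texts title _
  unfold Spec_no_colon_section no_colon_section no_colon_section_alt
  rw [loopA_false]
  cases texts.findIdx? pvIsMarker with
  | none => rfl
  | some i => cases PySem.List.index? (texts.take i) "Summary" <;> simp
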